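-- pv_equiv track=rewrite | github.com/EROStxm/python | EjercicioN1.py | SubBaj
-- ===== SOURCE A (Python) =====
-- def SubBaj(w):
--     t = 1; p = 1; sig = 1
--     k=0
--     for i in range(1,w+1,1):
--         k = t
--         t = t + sig
--         p = p + 1
--         if p > 2:
--             sig = sig *(-1)
--             p = 1
--     return k
-- ===== SOURCE B (Python) =====
-- def SubBaj(w):
--     if w <= 0:
--         return 0
--     return (1, 2, 3, 2)[(w - 1) % 4]
-- ===== Notes on version B (the rewrite author's own statement) =====
-- stated objective: faster
-- what changed: Replaced the O(w) simulation loop with a closed-form O(1) lookup of the period-4 value at (w-1) mod 4, returning 0 for w <= 0.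
import Mathlib
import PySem

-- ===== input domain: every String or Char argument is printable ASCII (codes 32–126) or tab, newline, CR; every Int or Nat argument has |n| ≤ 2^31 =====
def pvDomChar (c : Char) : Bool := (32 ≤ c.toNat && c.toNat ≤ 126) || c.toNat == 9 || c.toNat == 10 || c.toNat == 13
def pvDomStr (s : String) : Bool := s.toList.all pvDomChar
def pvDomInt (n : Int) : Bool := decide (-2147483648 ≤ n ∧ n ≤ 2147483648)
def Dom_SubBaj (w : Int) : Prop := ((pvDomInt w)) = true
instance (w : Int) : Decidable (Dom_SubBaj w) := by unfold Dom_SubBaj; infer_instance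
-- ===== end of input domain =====

-- B replaces A's O(w) simulation loop by an O(1) closed-form lookup on (w-1) mod 4 (0 for w ≤ 0).

-- ===== PORT A =====
-- one loop iteration over the state (t, p, sig, k); the loop variable i is unused
def SubBajStep (st : Int × Int × Int × Int) : Int × Int × Int × Int :=
  let t := st.1; let p := st.2.1; let sig := st.2.2.1
  let k := t
  let t := t + sig
  let p := p + 1
  if p > 2 then (t, 1, sig * (-1), k) else (t, p, sig, k)

def SubBaj (w : Int) : Int :=
  let st := (PySem.List.pyRange 1 (w + 1) 1).foldl (fun st _ => SubBajStep st) (1, 1, 1, 0)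
  st.2.2.2

-- ===== PORT B =====
def SubBaj_alt (w : Int) : Int :=
  if w ≤ 0 then 0
  else
    match PySem.Int.mod (w - 1) 4 with
    | 0 => 1
    | 1 => 2
    | 2 => 3
    | _ => 2

-- ===== PRECONDITION & SPEC =====
def Spec_SubBaj (w : Int) (out : Int) : Prop := out = SubBaj_alt w
instance (w : Int) (out : Int) : Decidable (Spec_SubBaj w out) := by unfold Spec_SubBaj; infer_instance

-- ===== CLAIM (what is proved, stated in full; the proofs are below) =====
def Claim_equal_SubBaj : Prop := ∀ (w : Int), Dom_SubBaj w → Spec_SubBaj w (SubBaj w)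

-- ===== LEMMAS AND PROOFS =====

-- the foldl ignores the list elements: only the length matters
theorem foldl_step_eq_iterate (l : List Int) (st : Int × Int × Int × Int) :
    l.foldl (fun st _ => SubBajStep st) st = SubBajStep^[l.length] st := by
  induction l generalizing st with
  | nil => simp
  | cons a l ih => simp [List.foldl_cons, ih, Function.iterate_succ_apply]

theorem iterate_period (n : Nat) :
    SubBajStep^[n + 5] (1, 1, 1, 0) = SubBajStep^[n + 1] (1, 1, 1, 0) := by
  have h : SubBajStep^[5] (1, 1, 1, 0) = SubBajStep^[1] (1, 1, 1, 0) := by decide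
  calc SubBajStep^[n + 5] (1, 1, 1, 0) = SubBajStep^[n] (SubBajStep^[5] (1, 1, 1, 0)) := by
        rw [← Function.iterate_add_apply]
    _ = SubBajStep^[n] (SubBajStep^[1] (1, 1, 1, 0)) := by rw [h]
    _ = SubBajStep^[n + 1] (1, 1, 1, 0) := by rw [← Function.iterate_add_apply]

-- closed form for the k component after n iterations
theorem k_closed (n : Nat) :
    (SubBajStep^[n] (1, 1, 1, 0)).2.2.2 =
      if n = 0 then 0 else [(1 : Int), 2, 3, 2].getD ((n - 1) % 4) 0 := by
  induction n using Nat.strong_induction_on with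
  | _ n ih =>
    match n, ih with
    | 0, _ => decide
    | 1, _ => decide
    | 2, _ => decide
    | 3, _ => decide
    | 4, _ => decide
    | (m + 5), ih =>
      rw [iterate_period m]
      rw [ih (m + 1) (by omega)]
      have h4 : (m + 5 - 1) % 4 = (m + 1 - 1) % 4 := by omega
      rw [h4, if_neg (by omega : ¬ m + 5 = 0), if_neg (by omega : ¬ m + 1 = 0)]

theorem SubBaj_spec : Claim_equal_SubBaj := by
  intro w _
  unfold Spec_SubBaj SubBaj SubBaj_alt
  rw [foldl_step_eq_iterate, PySem.List.length_pyRange_one]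
  by_cases hw : w ≤ 0
  · simp [k_closed, hw]
  · rw [k_closed]
    have hq : PySem.Int.mod (w - 1) 4 = (w - 1) % 4 :=
      PySem.Int.mod_eq_emod_of_pos (by norm_num : (0 : Int) < 4)
    have hn0 : (w + 1 - 1).toNat ≠ 0 := by omega
    have hmod : ((w + 1 - 1).toNat - 1) % 4 = ((w - 1) % 4).toNat := by omega
    simp only [hn0, if_false, hmod, hq, if_neg (by omega : ¬ w ≤ 0)]
    have h4 : (w - 1) % 4 = 0 ∨ (w - 1) % 4 = 1 ∨ (w - 1) % 4 = 2 ∨ (w - 1) % 4 = 3 := by omega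
    rcases h4 with h | h | h | h <;> rw [h] <;> decide

-- (verdict is the theorem SubBaj_spec above)
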